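-- pv_equiv track=rewrite | github.com/shonty99/Python-Programs | Assign4.5.py | FactDiff
-- ===== SOURCE A (Python) =====
-- def FactDiff(No):
--     Fact = 0
--     NonFact = 0
--     for i in range(1,No,1):
--         if(No%i==0):
--             Fact = Fact + i
--         else:
--             NonFact = NonFact + i
--     return(Fact-NonFact)
-- ===== SOURCE B (Python) =====
-- def FactDiff(No):
--     # 2*(sum of proper divisors of No) - sum(1..No-1), divisors found in O(sqrt(No))
--     if No <= 1:
--         return 0
--     s = 0
--     i = 1
--     while i * i <= No:
--         if No % i == 0:
--             s += i
--             j = No // i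
--             if j != i:
--                 s += j
--         i += 1
--     s -= No
--     total = No * (No - 1) // 2
--     return 2 * s - total
-- ===== Notes on version B (the rewrite author's own statement) =====
-- stated objective: faster
-- what changed: Instead of scanning every i in 1..No-1 and accumulating divisors and non-divisors separately, B enumerates divisor pairs (i, No//i) up to sqrt(No) and uses the closed form No*(No-1)//2 for the total, returning 2*divsum - total.
import Mathlib
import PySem

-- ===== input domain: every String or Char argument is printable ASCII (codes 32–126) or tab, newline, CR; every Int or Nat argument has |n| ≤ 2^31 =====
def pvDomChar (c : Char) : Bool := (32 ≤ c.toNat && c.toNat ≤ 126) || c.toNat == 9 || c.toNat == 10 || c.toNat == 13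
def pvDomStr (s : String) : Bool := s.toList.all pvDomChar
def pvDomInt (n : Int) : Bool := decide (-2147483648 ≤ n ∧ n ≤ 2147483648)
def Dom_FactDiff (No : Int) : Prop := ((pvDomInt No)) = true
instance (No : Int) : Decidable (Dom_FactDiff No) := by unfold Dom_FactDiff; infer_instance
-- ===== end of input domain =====

-- B replaces A's linear scan of 1..No-1 by an O(√No) divisor-pair enumeration
-- plus the closed form No*(No-1)//2 for the total of the scanned range.

-- ===== PORT A =====
def FactDiff (No : Int) : Int :=
  let st := (PySem.List.pyRange 1 No 1).foldl
    (fun (st : Int × Int) i =>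
      if PySem.Int.mod No i = 0 then (st.1 + i, st.2) else (st.1, st.2 + i))
    (0, 0)
  st.1 - st.2

-- ===== PORT B =====
-- Source B's 'while i * i <= No' loop; the '1 ≤ i' conjunct is a totality guard only
-- (B always calls this with i = 1 and i only increases, so it never changes the result).
def FactDiffAltLoop (No : Int) (i : Int) (s : Int) : Int :=
  if h : i * i ≤ No ∧ 1 ≤ i then
    FactDiffAltLoop No (i + 1)
      (if PySem.Int.mod No i = 0 then
        (if PySem.Int.floordiv No i ≠ i then s + i + PySem.Int.floordiv No i else s + i)
       else s)
  else s
termination_by (No + 1 - i).toNat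
decreasing_by
  have h1 : i * 1 ≤ i * i := mul_le_mul_of_nonneg_left h.2 (by omega)
  simp only [mul_one] at h1
  omega

def FactDiff_alt (No : Int) : Int :=
  if No ≤ 1 then 0
  else
    let s := FactDiffAltLoop No 1 0
    let s' := s - No
    let total := PySem.Int.floordiv (No * (No - 1)) 2
    2 * s' - total

-- ===== PRECONDITION & SPEC =====
def Spec_FactDiff (No : Int) (out : Int) : Prop := out = FactDiff_alt No
instance (No : Int) (out : Int) : Decidable (Spec_FactDiff No out) := by unfold Spec_FactDiff; infer_instance

-- ===== CLAIM (what is proved, stated in full; the proofs are below) =====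
def Claim_equal_FactDiff : Prop := ∀ (No : Int), Dom_FactDiff No → Spec_FactDiff No (FactDiff No)

-- ===== LEMMAS AND PROOFS =====

-- A's loop unrolled: the pair after folding 1,…,m is a pair of divisor/non-divisor sums.
theorem factdiff_foldA (No : Int) (m : ℕ) (a b : Int) :
    ((List.range m).map (fun k : ℕ => (1 : Int) + (k : Int))).foldl
      (fun (st : Int × Int) i =>
        if PySem.Int.mod No i = 0 then (st.1 + i, st.2) else (st.1, st.2 + i))
      (a, b)
    = (a + ∑ k ∈ Finset.range m, (if ((1 : Int) + (k : Int)) ∣ No then ((1 : Int) + (k : Int)) else 0),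
       b + ∑ k ∈ Finset.range m, (if ((1 : Int) + (k : Int)) ∣ No then 0 else ((1 : Int) + (k : Int)))) := by
  induction m with
  | zero => simp
  | succ m ih =>
      rw [List.range_succ, List.map_append, List.foldl_append, ih]
      simp only [List.map_cons, List.map_nil, List.foldl_cons, List.foldl_nil,
        PySem.Int.mod_eq_zero_iff_dvd, Finset.sum_range_succ]
      by_cases hd : ((1 : Int) + (m : Int)) ∣ No <;> simp only [hd, if_true, if_false] <;>
        refine Prod.ext ?_ ?_ <;> simp <;> ring

-- B's loop equals the sum of divisor pairs (d, n/d) over divisors d of n with i ≤ d, d*d ≤ n.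
theorem factdiff_loopB (n : ℕ) (hn : 2 ≤ n) (i s : Int) (hi : 1 ≤ i) :
      FactDiffAltLoop (n : Int) i s
      = s + ∑ d ∈ n.divisors.filter (fun d : ℕ => (i ≤ (d : Int)) ∧ d * d ≤ n),
            ((d : Int) + (if n / d ≠ d then ((n / d : ℕ) : Int) else 0)) := by
  by_cases hlt : i * i ≤ (n : Int)
  · have hrec : ∀ t : Int, FactDiffAltLoop (n : Int) (i + 1) t
        = t + ∑ d ∈ n.divisors.filter (fun d : ℕ => ((i + 1) ≤ (d : Int)) ∧ d * d ≤ n),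
              ((d : Int) + (if n / d ≠ d then ((n / d : ℕ) : Int) else 0)) :=
      fun t => factdiff_loopB n hn (i + 1) t (by omega)
    rw [FactDiffAltLoop, dif_pos ⟨hlt, hi⟩, hrec]
    have hiN : ((i.toNat : ℕ) : Int) = i := by omega
    by_cases hdvd : PySem.Int.mod (n : Int) i = 0
    · have hdvdN : (i.toNat : ℕ) ∣ n := by
        have h := (PySem.Int.mod_eq_zero_iff_dvd (n : Int) i).mp hdvd
        rw [← hiN] at h
        exact_mod_cast h
      have hsqN : i.toNat * i.toNat ≤ n := by
        have : ((i.toNat : ℕ) : Int) * ((i.toNat : ℕ) : Int) ≤ (n : Int) := by rw [hiN]; exact hlt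
        exact_mod_cast this
      have hmem : i.toNat ∈ n.divisors.filter (fun d : ℕ => (i ≤ (d : Int)) ∧ d * d ≤ n) := by
        simp only [Finset.mem_filter, Nat.mem_divisors]
        exact ⟨⟨hdvdN, by omega⟩, by omega, hsqN⟩
      have hnotmem : i.toNat ∉ n.divisors.filter (fun d : ℕ => ((i + 1) ≤ (d : Int)) ∧ d * d ≤ n) := by
        simp only [Finset.mem_filter]
        rintro ⟨-, hge, -⟩
        omega
      have hsplit : n.divisors.filter (fun d : ℕ => (i ≤ (d : Int)) ∧ d * d ≤ n)
          = insert i.toNat (n.divisors.filter (fun d : ℕ => ((i + 1) ≤ (d : Int)) ∧ d * d ≤ n)) := by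
        ext d
        simp only [Finset.mem_insert, Finset.mem_filter]
        constructor
        · rintro ⟨hd, hge, hsq⟩
          by_cases hdi : d = i.toNat
          · exact Or.inl hdi
          · exact Or.inr ⟨hd, by omega, hsq⟩
        · rintro (rfl | ⟨hd, hge, hsq⟩)
          · simpa only [Finset.mem_filter] using hmem
          · exact ⟨hd, by omega, hsq⟩
      rw [hsplit, Finset.sum_insert hnotmem]
      have hfd : PySem.Int.floordiv (n : Int) i = ((n / i.toNat : ℕ) : Int) := by
        rw [← hiN, PySem.Int.floordiv_natCast]
        simp
      rw [if_pos hdvd, hfd]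
      by_cases hcase : n / i.toNat = i.toNat
      · rw [if_neg (by rw [hcase, hiN]; simp), if_neg (fun h => h hcase), hiN]
        ring
      · rw [if_pos (by rw [← hiN]; exact_mod_cast hcase), if_pos hcase, hiN]
        ring
    · have hndvdN : ¬ (i.toNat : ℕ) ∣ n := by
        intro hc
        apply hdvd
        rw [PySem.Int.mod_eq_zero_iff_dvd, ← hiN]
        exact_mod_cast hc
      have hsame : n.divisors.filter (fun d : ℕ => (i ≤ (d : Int)) ∧ d * d ≤ n)
          = n.divisors.filter (fun d : ℕ => ((i + 1) ≤ (d : Int)) ∧ d * d ≤ n) := by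
        ext d
        simp only [Finset.mem_filter, Nat.mem_divisors]
        constructor
        · rintro ⟨⟨hdvd', hn0⟩, hge, hsq⟩
          refine ⟨⟨hdvd', hn0⟩, ?_, hsq⟩
          have hdi : d ≠ i.toNat := fun hc => hndvdN (hc ▸ hdvd')
          omega
        · rintro ⟨hd, hge, hsq⟩
          exact ⟨hd, by omega, hsq⟩
      rw [if_neg hdvd, hsame]
  · rw [FactDiffAltLoop, dif_neg (by tauto)]
    have hempty : n.divisors.filter (fun d : ℕ => (i ≤ (d : Int)) ∧ d * d ≤ n) = ∅ := by
      ext d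
      simp only [Finset.mem_filter, Finset.notMem_empty, iff_false]
      rintro ⟨hd, hge, hsq⟩
      apply hlt
      calc i * i ≤ (d : Int) * (d : Int) := mul_le_mul hge hge (by omega) (by omega)
        _ ≤ (n : Int) := by exact_mod_cast hsq
    rw [hempty, Finset.sum_empty, add_zero]
termination_by ((n : Int) + 1 - i).toNat
decreasing_by
  have h1 : i * 1 ≤ i * i := mul_le_mul_of_nonneg_left hi (by omega)
  simp only [mul_one] at h1
  omega

-- The √n divisor-pair sum equals the full divisor sum (ℕ version).
theorem factdiff_pairing (n : ℕ) (hn : 1 ≤ n) :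
    ∑ d ∈ n.divisors.filter (fun d => d * d ≤ n), (d + (if n / d ≠ d then n / d else 0))
    = ∑ d ∈ n.divisors, d := by
  have hn0 : n ≠ 0 := by omega
  rw [Finset.sum_add_distrib]
  have hstep1 :
      ∑ d ∈ n.divisors.filter (fun d => d * d ≤ n), (if n / d ≠ d then n / d else 0)
      = ∑ d ∈ n.divisors.filter (fun d => d * d < n), n / d := by
    rw [← Finset.sum_filter, Finset.filter_filter]
    have hset : n.divisors.filter (fun d => d * d ≤ n ∧ n / d ≠ d)
        = n.divisors.filter (fun d => d * d < n) := by
      ext d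
      simp only [Finset.mem_filter, Nat.mem_divisors]
      constructor
      · rintro ⟨⟨hdvd, -⟩, hle, hne⟩
        refine ⟨⟨hdvd, hn0⟩, ?_⟩
        rcases Nat.lt_or_ge (d * d) n with h | h
        · exact h
        · exfalso
          apply hne
          have heq : d * d = n := by omega
          have hdpos : 0 < d := Nat.pos_of_dvd_of_pos hdvd (by omega)
          have hmul : d * (n / d) = n := Nat.mul_div_cancel' hdvd
          exact Nat.eq_of_mul_eq_mul_left hdpos (by rw [hmul, heq])
      · rintro ⟨⟨hdvd, -⟩, hlt⟩
        have hmul : d * (n / d) = n := Nat.mul_div_cancel' hdvd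
        refine ⟨⟨hdvd, hn0⟩, by omega, fun hc => ?_⟩
        rw [hc] at hmul
        omega
    rw [hset]
  have hstep2 :
      ∑ d ∈ n.divisors.filter (fun d => d * d < n), n / d
      = ∑ d ∈ n.divisors.filter (fun d => ¬ d * d ≤ n), d := by
    refine Finset.sum_nbij' (fun d => n / d) (fun d => n / d) ?_ ?_ ?_ ?_ ?_
    · intro d hd
      simp only [Finset.mem_filter, Nat.mem_divisors] at hd ⊢
      obtain ⟨⟨hdvd, -⟩, hlt⟩ := hd
      have hdpos : 0 < d := Nat.pos_of_dvd_of_pos hdvd (by omega)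
      have hmul : d * (n / d) = n := Nat.mul_div_cancel' hdvd
      have hq : 0 < n / d := by
        rcases Nat.eq_zero_or_pos (n / d) with h | h
        · rw [h] at hmul; omega
        · exact h
      have hdlt : d < n / d := by
        apply Nat.lt_of_mul_lt_mul_left (a := d)
        rw [hmul]
        exact hlt
      refine ⟨⟨⟨d, (Nat.div_mul_cancel hdvd).symm⟩, hn0⟩, ?_⟩
      intro hc
      nlinarith [hmul, hdlt, hq, hc]
    · intro d hd
      simp only [Finset.mem_filter, Nat.mem_divisors] at hd ⊢
      obtain ⟨⟨hdvd, -⟩, hgt⟩ := hd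
      have hdpos : 0 < d := Nat.pos_of_dvd_of_pos hdvd (by omega)
      have hmul : d * (n / d) = n := Nat.mul_div_cancel' hdvd
      have hq : 0 < n / d := by
        rcases Nat.eq_zero_or_pos (n / d) with h | h
        · rw [h] at hmul; omega
        · exact h
      have hdgt : n / d < d := by
        apply Nat.lt_of_mul_lt_mul_left (a := d)
        rw [hmul]
        omega
      refine ⟨⟨⟨d, (Nat.div_mul_cancel hdvd).symm⟩, hn0⟩, ?_⟩
      nlinarith [hmul, hdgt, hq]
    · intro d hd
      simp only [Finset.mem_filter, Nat.mem_divisors] at hd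
      exact Nat.div_div_self hd.1.1 hn0
    · intro d hd
      simp only [Finset.mem_filter, Nat.mem_divisors] at hd
      exact Nat.div_div_self hd.1.1 hn0
    · intro d hd
      rfl
  rw [hstep1, hstep2, Finset.sum_filter_add_sum_filter_not]

-- ===== VERDICT (by name: the statement is the Claim_ definition above) =====
theorem FactDiff_spec : Claim_equal_FactDiff := by
  intro No _
  simp only [Spec_FactDiff, FactDiff, FactDiff_alt]
  by_cases hle : No ≤ 1
  · rw [PySem.List.pyRange_one_eq_nil hle]
    simp [hle]
  · set n : ℕ := No.toNat with hnN
    have hNo : No = (n : Int) := by simp only [not_le] at hle; omega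
    have hn2 : 2 ≤ n := by omega
    rw [PySem.List.pyRange_one, factdiff_foldA]
    dsimp only
    simp only [zero_add]
    set F : Int := ∑ k ∈ Finset.range (No - 1).toNat,
      (if ((1 : Int) + (k : Int)) ∣ No then ((1 : Int) + (k : Int)) else 0) with hF
    set G : Int := ∑ k ∈ Finset.range (No - 1).toNat,
      (if ((1 : Int) + (k : Int)) ∣ No then 0 else ((1 : Int) + (k : Int))) with hG
    have hFval : F = ((∑ d ∈ n.properDivisors, d : ℕ) : Int) := by
      rw [hF]
      have h1 : ∀ k ∈ Finset.range (No - 1).toNat,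
          (if ((1 : Int) + (k : Int)) ∣ No then ((1 : Int) + (k : Int)) else 0)
          = (((if (1 + k) ∣ n then (1 + k) else 0 : ℕ)) : Int) := by
        intro k _
        have hcast : ((1 : Int) + (k : Int)) = ((1 + k : ℕ) : Int) := by push_cast; ring
        simp only [hcast, hNo, Int.natCast_dvd_natCast]
        split_ifs <;> simp
      rw [Finset.sum_congr rfl h1, ← Nat.cast_sum]
      congr 1
      have hm : (No - 1).toNat = n - 1 := by omega
      rw [hm]
      have hpd : (n.properDivisors : Finset ℕ) = (Finset.Ico 1 n).filter (fun d => d ∣ n) := rfl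
      rw [hpd, Finset.sum_filter, Finset.sum_Ico_eq_sum_range]
    have hFG : F + G = ((∑ k ∈ Finset.range n, k : ℕ) : Int) := by
      rw [hF, hG, ← Finset.sum_add_distrib]
      have h1 : ∀ k ∈ Finset.range (No - 1).toNat,
          ((if ((1 : Int) + (k : Int)) ∣ No then ((1 : Int) + (k : Int)) else 0)
           + (if ((1 : Int) + (k : Int)) ∣ No then 0 else ((1 : Int) + (k : Int))))
          = ((1 : Int) + (k : Int)) := by
        intro k _
        split_ifs <;> ring
      rw [Finset.sum_congr rfl h1]
      have hm : (No - 1).toNat = n - 1 := by omega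
      have h2 : ∑ k ∈ Finset.range n, k = ∑ k ∈ Finset.range (n - 1), (1 + k) := by
        rw [Finset.range_eq_Ico, Finset.sum_eq_sum_Ico_succ_bot (by omega : 0 < n)]
        rw [Finset.sum_Ico_eq_sum_range]
        simp
      rw [hm, h2]
      push_cast
      rfl
    have hif : ¬ ((n : Int) ≤ 1) := by omega
    rw [hNo, if_neg hif]
    rw [factdiff_loopB n hn2 1 0 (by omega), zero_add]
    have hfilter : n.divisors.filter (fun d : ℕ => ((1 : Int) ≤ (d : Int)) ∧ d * d ≤ n)
        = n.divisors.filter (fun d : ℕ => d * d ≤ n) := by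
      ext d
      simp only [Finset.mem_filter, Nat.mem_divisors]
      constructor
      · rintro ⟨hd, -, hsq⟩; exact ⟨hd, hsq⟩
      · rintro ⟨hd, hsq⟩
        have : 0 < d := Nat.pos_of_dvd_of_pos hd.1 (by omega)
        exact ⟨hd, by exact_mod_cast this, hsq⟩
    rw [hfilter]
    have hsumcast :
        ∑ d ∈ n.divisors.filter (fun d : ℕ => d * d ≤ n),
          ((d : Int) + (if n / d ≠ d then ((n / d : ℕ) : Int) else 0))
        = ((∑ d ∈ n.divisors.filter (fun d => d * d ≤ n),
            (d + (if n / d ≠ d then n / d else 0)) : ℕ) : Int) := by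
      rw [Nat.cast_sum]
      refine Finset.sum_congr rfl fun d _ => ?_
      push_cast
      split_ifs <;> simp
    rw [hsumcast, factdiff_pairing n (by omega)]
    have hsig : ((∑ d ∈ n.divisors, d : ℕ) : Int)
        = ((∑ d ∈ n.properDivisors, d : ℕ) : Int) + (n : Int) := by
      rw [Nat.sum_divisors_eq_sum_properDivisors_add_self]
      push_cast
      ring
    have htot : PySem.Int.floordiv ((n : Int) * ((n : Int) - 1)) 2
        = ((∑ k ∈ Finset.range n, k : ℕ) : Int) := by
      rw [PySem.Int.floordiv_eq_ediv_of_pos (by omega)]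
      have hx : (n : Int) * ((n : Int) - 1) = ((∑ k ∈ Finset.range n, k : ℕ) : Int) * 2 := by
        have hg := Finset.sum_range_id_mul_two n
        have h1 : (((∑ k ∈ Finset.range n, k) * 2 : ℕ) : Int) = ((n * (n - 1) : ℕ) : Int) := by
          rw [hg]
        have hn1 : ((n - 1 : ℕ) : Int) = (n : Int) - 1 := by omega
        calc (n : Int) * ((n : Int) - 1) = ((n * (n - 1) : ℕ) : Int) := by rw [Nat.cast_mul, hn1]
          _ = (((∑ k ∈ Finset.range n, k) * 2 : ℕ) : Int) := h1.symm
          _ = ((∑ k ∈ Finset.range n, k : ℕ) : Int) * 2 := by rw [Nat.cast_mul]; norm_num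
      rw [hx]
      omega
    rw [hsig, htot, hFval]
    omega
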